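-- pv_equiv track=rewrite | github.com/Glen02lee/PPS_solved | 3주차/1번째 제출/A152_이민석_20250121.py | max_stair_score
-- ===== SOURCE A (Python) =====
-- def max_stair_score(n, score):
--     if n == 1:
--         return score[0]
--     if n == 2:
--         return score[0] + score[1]
--
--     dp = [0] * n
--     dp[0] = score[0]
--     dp[1] = score[0] + score[1]
--     dp[2] = max(score[0] + score[2], score[1] + score[2])
--
--     # DP
--     for i in range(3, n):
--         dp[i] = max(dp[i-2] + score[i], dp[i-3] + score[i-1] + score[i])
--
--     return dp[-1]
-- ===== SOURCE B (Python) =====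
-- def max_stair_score(n, score):
--     # Complementary formulation: instead of maximizing the stepped stairs,
--     # subtract from the total of the first n stairs the minimum total of
--     # skipped stairs (g[i] = cheapest valid skip pattern whose last skip is
--     # stair i; consecutive skips are 2 or 3 apart, the last skip lies on
--     # stair n-3 or n-2).
--     if n == 1:
--         return score[0]
--     if n == 2:
--         return score[0] + score[1]
--     g = list(score[:3]) + [0] * (n - 3)
--     for i in range(3, n - 1):
--         g[i] = score[i] + min(g[i - 2], g[i - 3])
--     return sum(score[:n]) - min(g[n - 3], g[n - 2])
-- ===== Notes on version B (the rewrite author's own statement) =====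
-- stated objective: alternative
-- what changed: Replaces the maximizing dp over stepped stairs (dp[i]=max(dp[i-2]+s[i],dp[i-3]+s[i-1]+s[i])) by the complementary formulation: the total of the first n stairs minus a minimizing dp over the SKIPPED stairs (g[i]=s[i]+min(g[i-2],g[i-3]), answer = sum - min(g[n-3],g[n-2])).
import Mathlib
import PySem

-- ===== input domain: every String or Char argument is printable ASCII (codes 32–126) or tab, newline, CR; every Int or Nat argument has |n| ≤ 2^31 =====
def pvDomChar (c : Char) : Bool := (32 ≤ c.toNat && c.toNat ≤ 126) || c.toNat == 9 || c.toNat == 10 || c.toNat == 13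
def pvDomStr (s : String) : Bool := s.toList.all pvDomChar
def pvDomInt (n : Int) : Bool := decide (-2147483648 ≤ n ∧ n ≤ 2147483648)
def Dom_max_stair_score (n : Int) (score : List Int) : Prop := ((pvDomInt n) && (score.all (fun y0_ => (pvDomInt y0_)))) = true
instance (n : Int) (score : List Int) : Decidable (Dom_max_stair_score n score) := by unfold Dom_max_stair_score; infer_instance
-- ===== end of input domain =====

-- B replaces A's maximizing dp over the stepped stairs by the complementary
-- formulation: total of the first n stairs minus a minimizing dp over the
-- SKIPPED stairs; equivalence proved on Pre_.

-- ===== PORT A =====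
-- score[i] with a default; exact under Pre_ (all indices read are in range there)
def pvS (score : List Int) (i : Int) : Int := PySem.List.pyGetD score i 0

-- body of A's 'for i in range(3, n)' loop: dp[i] = max(dp[i-2]+score[i], dp[i-3]+score[i-1]+score[i])
def pvStepA (score : List Int) (dp : List Int) (i : Int) : List Int :=
  PySem.List.pySetD dp i
    (max (PySem.List.pyGetD dp (i-2) 0 + pvS score i)
         (PySem.List.pyGetD dp (i-3) 0 + pvS score (i-1) + pvS score i))

def max_stair_score (n : Int) (score : List Int) : Int :=
  if n = 1 then pvS score 0
  else if n = 2 then pvS score 0 + pvS score 1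
  else
    let dp := PySem.List.pyRepeat [(0 : Int)] n
    let dp := PySem.List.pySetD dp 0 (pvS score 0)
    let dp := PySem.List.pySetD dp 1 (pvS score 0 + pvS score 1)
    let dp := PySem.List.pySetD dp 2 (max (pvS score 0 + pvS score 2) (pvS score 1 + pvS score 2))
    let dp := (PySem.List.pyRange 3 n 1).foldl (pvStepA score) dp
    PySem.List.pyGetD dp (-1) 0

-- ===== PORT B =====
-- body of B's loop: g[i] = score[i] + min(g[i-2], g[i-3])
def pvStepB (score : List Int) (g : List Int) (i : Int) : List Int :=
  PySem.List.pySetD g i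
    (pvS score i + min (PySem.List.pyGetD g (i-2) 0) (PySem.List.pyGetD g (i-3) 0))

def max_stair_score_alt (n : Int) (score : List Int) : Int :=
  if n = 1 then pvS score 0
  else if n = 2 then pvS score 0 + pvS score 1
  else
    let g := PySem.List.slice score none (some 3) ++ PySem.List.pyRepeat [(0 : Int)] (n - 3)
    let g := (PySem.List.pyRange 3 (n - 1) 1).foldl (pvStepB score) g
    (PySem.List.slice score none (some n)).sum
      - min (PySem.List.pyGetD g (n - 3) 0) (PySem.List.pyGetD g (n - 2) 0)

-- ===== PRECONDITION & SPEC =====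
-- exactly where A returns: for n ≤ 0 A hits an IndexError (dp[0] on an empty dp),
-- and for n > len(score) it reads score[n-1] out of range
def Pre_max_stair_score (n : Int) (score : List Int) : Prop :=
  1 ≤ n ∧ n ≤ (score.length : Int)
instance (n : Int) (score : List Int) : Decidable (Pre_max_stair_score n score) := by
  unfold Pre_max_stair_score; infer_instance

def pvWitness_max_stair_score : Int × List Int := (5, [3, -2, 7, 1, 4])

def Spec_max_stair_score (n : Int) (score : List Int) (out : Int) : Prop := out = max_stair_score_alt n score
instance (n : Int) (score : List Int) (out : Int) : Decidable (Spec_max_stair_score n score out) := by unfold Spec_max_stair_score; infer_instance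

-- ===== CLAIM (what is proved, stated in full; the proofs are below) =====
def Claim_equal_max_stair_score : Prop := ∀ (n : Int) (score : List Int), Dom_max_stair_score n score → Pre_max_stair_score n score → Spec_max_stair_score n score (max_stair_score n score)

-- ===== LEMMAS AND PROOFS =====

-- score[k] at a Nat index (proof-side view of pvS)
def pvSN (score : List Int) (k : Nat) : Int := pvS score (k : Int)

-- reference value of A's dp[k]
def pvG (score : List Int) : Nat → Int
  | 0 => pvSN score 0
  | 1 => pvSN score 0 + pvSN score 1
  | 2 => max (pvSN score 0 + pvSN score 2) (pvSN score 1 + pvSN score 2)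
  | (k+3) => max (pvG score (k+1) + pvSN score (k+3))
                 (pvG score k + pvSN score (k+2) + pvSN score (k+3))

-- reference value of B's g[k]: cheapest skip pattern ending with a skip at k
def pvM (score : List Int) : Nat → Int
  | 0 => pvSN score 0
  | 1 => pvSN score 1
  | 2 => pvSN score 2
  | (k+3) => pvSN score (k+3) + min (pvM score (k+1)) (pvM score k)

-- prefix sum score[0] + … + score[k]
def pvPS (score : List Int) (k : Nat) : Int := (score.take (k+1)).sum

lemma pvSN_getD (score : List Int) (k : Nat) : pvSN score k = score.getD k 0 := by
  simp [pvSN, pvS, PySem.List.pyGetD_natCast]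

lemma pvPS_succ (score : List Int) (k : Nat) :
    pvPS score (k+1) = pvPS score k + pvSN score (k+1) := by
  rw [pvPS, pvPS, List.take_add_one, List.sum_append, pvSN_getD, List.getD]
  cases h : score[k+1]? <;> simp [h]

lemma pvPS_zero (score : List Int) : pvPS score 0 = pvSN score 0 := by
  rw [pvPS, pvSN_getD]
  cases score <;> simp [List.getD]


lemma pvDual (score : List Int) : ∀ m : Nat,
    pvG score (m+2) = pvPS score (m+2) - min (pvM score (m+1)) (pvM score m) := by
  intro m
  induction m using Nat.strong_induction_on with
  | _ m ih =>
    match m with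
    | 0 =>
      show pvG score 2 = pvPS score 2 - min (pvM score 1) (pvM score 0)
      have h1 : pvPS score 1 = pvPS score 0 + pvSN score 1 := pvPS_succ score 0
      have h2 : pvPS score 2 = pvPS score 1 + pvSN score 2 := pvPS_succ score 1
      have h0 : pvPS score 0 = pvSN score 0 := pvPS_zero score
      have eg : pvG score 2 = max (pvSN score 0 + pvSN score 2) (pvSN score 1 + pvSN score 2) := rfl
      have em1 : pvM score 1 = pvSN score 1 := rfl
      have em0 : pvM score 0 = pvSN score 0 := rfl
      omega
    | 1 =>
      show pvG score 3 = pvPS score 3 - min (pvM score 2) (pvM score 1)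
      have h1 : pvPS score 1 = pvPS score 0 + pvSN score 1 := pvPS_succ score 0
      have h2 : pvPS score 2 = pvPS score 1 + pvSN score 2 := pvPS_succ score 1
      have h3 : pvPS score 3 = pvPS score 2 + pvSN score 3 := pvPS_succ score 2
      have h0 : pvPS score 0 = pvSN score 0 := pvPS_zero score
      have eg : pvG score 3 = max ((pvSN score 0 + pvSN score 1) + pvSN score 3)
          (pvSN score 0 + pvSN score 2 + pvSN score 3) := rfl
      have em2 : pvM score 2 = pvSN score 2 := rfl
      have em1 : pvM score 1 = pvSN score 1 := rfl
      omega
    | 2 =>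
      show pvG score 4 = pvPS score 4 - min (pvM score 3) (pvM score 2)
      have h1 : pvPS score 1 = pvPS score 0 + pvSN score 1 := pvPS_succ score 0
      have h2 : pvPS score 2 = pvPS score 1 + pvSN score 2 := pvPS_succ score 1
      have h3 : pvPS score 3 = pvPS score 2 + pvSN score 3 := pvPS_succ score 2
      have h4 : pvPS score 4 = pvPS score 3 + pvSN score 4 := pvPS_succ score 3
      have h0 : pvPS score 0 = pvSN score 0 := pvPS_zero score
      have eg : pvG score 4 = max ((max (pvSN score 0 + pvSN score 2) (pvSN score 1 + pvSN score 2)) + pvSN score 4)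
          ((pvSN score 0 + pvSN score 1) + pvSN score 3 + pvSN score 4) := rfl
      have em3 : pvM score 3 = pvSN score 3 + min (pvSN score 1) (pvSN score 0) := rfl
      have em2 : pvM score 2 = pvSN score 2 := rfl
      omega
    | (k+3) =>
      show pvG score (k+5) = pvPS score (k+5) - min (pvM score (k+4)) (pvM score (k+3))
      have i1 : pvG score (k+3) = pvPS score (k+3) - min (pvM score (k+2)) (pvM score (k+1)) :=
        ih (k+1) (by omega)
      have i2 : pvG score (k+2) = pvPS score (k+2) - min (pvM score (k+1)) (pvM score k) :=
        ih k (by omega)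
      have h3 : pvPS score (k+3) = pvPS score (k+2) + pvSN score (k+3) := pvPS_succ score (k+2)
      have h4 : pvPS score (k+4) = pvPS score (k+3) + pvSN score (k+4) := pvPS_succ score (k+3)
      have h5 : pvPS score (k+5) = pvPS score (k+4) + pvSN score (k+5) := pvPS_succ score (k+4)
      have eg : pvG score (k+5) = max (pvG score (k+3) + pvSN score (k+5))
          (pvG score (k+2) + pvSN score (k+4) + pvSN score (k+5)) := rfl
      have em1 : pvM score (k+4) = pvSN score (k+4) + min (pvM score (k+2)) (pvM score (k+1)) := rfl
      have em2 : pvM score (k+3) = pvSN score (k+3) + min (pvM score (k+1)) (pvM score k) := rfl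
      omega

-- A's fold invariant: length is preserved and entries up to m+2 carry pvG
lemma pvA_inv (score : List Int) (n : Int) (hn3 : 3 ≤ n) (hn : n ≤ (score.length : Int))
    (m : Nat) (hm : (m : Int) + 3 ≤ n) :
    let dp0 := PySem.List.pySetD
      (PySem.List.pySetD
        (PySem.List.pySetD (PySem.List.pyRepeat [(0 : Int)] n) 0 (pvS score 0))
        1 (pvS score 0 + pvS score 1))
      2 (max (pvS score 0 + pvS score 2) (pvS score 1 + pvS score 2))
    let dp := (PySem.List.pyRange 3 (3 + (m : Int)) 1).foldl (pvStepA score) dp0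
    dp.length = n.toNat ∧ ∀ j : Nat, j < m + 3 → dp.getD j 0 = pvG score j := by
  intro dp0 dp
  have hrep : (PySem.List.pyRepeat [(0 : Int)] n).length = n.toNat := by
    simp [PySem.List.pyRepeat_singleton]
  have h0 : 0 < n.toNat := by omega
  have h1 : 1 < n.toNat := by omega
  have h2 : 2 < n.toNat := by omega
  induction m with
  | zero =>
    have hlen : dp0.length = n.toNat := by
      simp [dp0, PySem.List.pySetD_of_nonneg, hrep]
    have hnil : dp = dp0 := by
      simp [dp, show (3 : Int) + ((0 : Nat) : Int) = 3 by norm_num,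
        PySem.List.pyRange_one_eq_nil (by omega : (3:Int) ≤ 3)]
    refine ⟨by rw [hnil, hlen], ?_⟩
    intro j hj
    rw [hnil]
    interval_cases j <;>
      simp [dp0, PySem.List.pySetD_of_nonneg, List.getD, List.getElem?_set,
        List.length_set, hrep, h0, h1, h2, pvG, pvSN, pvS]
  | succ k ih =>
    have hk : (k : Int) + 3 ≤ n := by push_cast at hm ⊢; omega
    obtain ⟨ihlen, ihval⟩ := ih hk
    have hsplit : PySem.List.pyRange 3 (3 + ((k+1 : Nat) : Int)) 1
        = PySem.List.pyRange 3 (3 + (k : Int)) 1 ++ [3 + (k : Int)] := by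
      rw [show ((3 : Int) + ((k+1 : Nat) : Int)) = (3 + (k : Int)) + 1 by push_cast; ring]
      exact PySem.List.pyRange_one_succ_right (by omega)
    set dpk := (PySem.List.pyRange 3 (3 + (k : Int)) 1).foldl (pvStepA score) dp0 with hdpk
    have hdp : dp = pvStepA score dpk (3 + (k : Int)) := by
      simp only [dp, hsplit, List.foldl_append, List.foldl_cons, List.foldl_nil]
      rw [hdpk]
    have hinrange : k + 3 < dpk.length := by omega
    have hset : dp = dpk.set (k+3)
        (max (dpk.getD (k+1) 0 + pvSN score (k+3))
             (dpk.getD k 0 + pvSN score (k+2) + pvSN score (k+3))) := by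
      rw [hdp]
      unfold pvStepA
      rw [show (3 : Int) + (k : Int) - 2 = ((k+1 : Nat) : Int) by push_cast; ring,
          show (3 : Int) + (k : Int) - 3 = ((k : Nat) : Int) by push_cast; ring,
          show (3 : Int) + (k : Int) - 1 = ((k+2 : Nat) : Int) by push_cast; ring,
          show (3 : Int) + (k : Int) = ((k+3 : Nat) : Int) by push_cast; ring]
      rw [PySem.List.pySetD_natCast]
      simp only [PySem.List.pyGetD_natCast, pvSN, pvS]
    constructor
    · rw [hset]; simpa using ihlen
    · intro j hj
      rw [hset]
      rcases Nat.lt_or_ge j (k+3) with hlt | hge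
      · rw [List.getD, List.getElem?_set]
        have hne : ¬ (k + 3 = j) := by omega
        simp only [hne, if_false]
        exact ihval j hlt
      · have hj3 : j = k + 3 := by omega
        subst hj3
        rw [List.getD, List.getElem?_set]
        simp only [if_pos rfl, hinrange, if_pos]
        simp only [Option.getD_some]
        rw [ihval (k+1) (by omega), ihval k (by omega)]
        rfl

-- B's fold invariant: length is preserved and entries up to m+2 carry pvM
lemma pvB_inv (score : List Int) (n : Int) (hn3 : 3 ≤ n) (hn : n ≤ (score.length : Int))
    (m : Nat) (hm : (m : Int) + 3 ≤ n - 1) :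
    let g0 := PySem.List.slice score none (some 3) ++ PySem.List.pyRepeat [(0 : Int)] (n - 3)
    let g := (PySem.List.pyRange 3 (3 + (m : Int)) 1).foldl (pvStepB score) g0
    g.length = n.toNat ∧ ∀ j : Nat, j < m + 3 → g.getD j 0 = pvM score j := by
  intro g0 g
  have hlen0 : g0.length = n.toNat := by
    simp [g0, PySem.List.slice_to score (by omega : (0:Int) ≤ 3),
      PySem.List.pyRepeat_singleton]
    omega
  induction m with
  | zero =>
    have hnil : g = g0 := by
      simp [g, show (3 : Int) + ((0 : Nat) : Int) = 3 by norm_num,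
        PySem.List.pyRange_one_eq_nil (by omega : (3:Int) ≤ 3)]
    refine ⟨by rw [hnil, hlen0], ?_⟩
    intro j hj
    have hjlt : j < (score.take 3).length := by
      simp [List.length_take]; omega
    rw [hnil]
    have : g0.getD j 0 = (score.take 3).getD j 0 := by
      simp only [g0, PySem.List.slice_to score (by omega : (0:Int) ≤ 3)]
      rw [show (3:Int).toNat = 3 from rfl]
      rw [List.getD, List.getD, List.getElem?_append_left hjlt]
    rw [this]
    have hsc : (score.take 3).getD j 0 = score.getD j 0 := by
      rw [List.getD, List.getD, List.getElem?_take]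
      simp [hj]
    rw [hsc]
    interval_cases j <;>
      simp [pvM, pvSN_getD]
  | succ k ih =>
    have hk : (k : Int) + 3 ≤ n - 1 := by push_cast at hm ⊢; omega
    obtain ⟨ihlen, ihval⟩ := ih hk
    have hsplit : PySem.List.pyRange 3 (3 + ((k+1 : Nat) : Int)) 1
        = PySem.List.pyRange 3 (3 + (k : Int)) 1 ++ [3 + (k : Int)] := by
      rw [show ((3 : Int) + ((k+1 : Nat) : Int)) = (3 + (k : Int)) + 1 by push_cast; ring]
      exact PySem.List.pyRange_one_succ_right (by omega)
    set gk := (PySem.List.pyRange 3 (3 + (k : Int)) 1).foldl (pvStepB score) g0 with hgk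
    have hg : g = pvStepB score gk (3 + (k : Int)) := by
      simp only [g, hsplit, List.foldl_append, List.foldl_cons, List.foldl_nil]
      rw [hgk]
    have hinrange : k + 3 < gk.length := by omega
    have hset : g = gk.set (k+3)
        (pvSN score (k+3) + min (gk.getD (k+1) 0) (gk.getD k 0)) := by
      rw [hg]
      unfold pvStepB
      rw [show (3 : Int) + (k : Int) - 2 = ((k+1 : Nat) : Int) by push_cast; ring,
          show (3 : Int) + (k : Int) - 3 = ((k : Nat) : Int) by push_cast; ring,
          show (3 : Int) + (k : Int) = ((k+3 : Nat) : Int) by push_cast; ring]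
      rw [PySem.List.pySetD_natCast]
      simp only [PySem.List.pyGetD_natCast, pvSN, pvS]
    constructor
    · rw [hset]; simpa using ihlen
    · intro j hj
      rw [hset]
      rcases Nat.lt_or_ge j (k+3) with hlt | hge
      · rw [List.getD, List.getElem?_set]
        have hne : ¬ (k + 3 = j) := by omega
        simp only [hne, if_false]
        exact ihval j hlt
      · have hj3 : j = k + 3 := by omega
        subst hj3
        rw [List.getD, List.getElem?_set]
        simp only [if_pos rfl, hinrange, if_pos]
        simp only [Option.getD_some]
        rw [ihval (k+1) (by omega), ihval k (by omega)]
        rfl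

-- ===== VERDICT (by name: the statement is the Claim_ definition above) =====
theorem max_stair_score_spec : Claim_equal_max_stair_score := by
  intro n score _ hpre
  obtain ⟨h1, h2⟩ := hpre
  unfold Spec_max_stair_score max_stair_score max_stair_score_alt
  rcases eq_or_ne n 1 with rfl | hn1
  · simp
  rcases eq_or_ne n 2 with rfl | hn2
  · simp
  · have hn3 : 3 ≤ n := by omega
    simp only [if_neg hn1, if_neg hn2]
    -- A side: dp[-1] = pvG (n.toNat - 1)
    have hA := pvA_inv score n hn3 h2 (n - 3).toNat (by omega)
    rw [show (3 : Int) + (((n - 3).toNat : Nat) : Int) = n by omega] at hA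
    obtain ⟨hlenA, hvalA⟩ := hA
    set dp := (PySem.List.pyRange 3 n 1).foldl (pvStepA score)
      (PySem.List.pySetD
        (PySem.List.pySetD
          (PySem.List.pySetD (PySem.List.pyRepeat [(0 : Int)] n) 0 (pvS score 0))
          1 (pvS score 0 + pvS score 1))
        2 (max (pvS score 0 + pvS score 2) (pvS score 1 + pvS score 2))) with hdp
    have hlast : PySem.List.pyGetD dp (-1) 0 = dp.getD (dp.length - 1) 0 := by
      rw [PySem.List.pyGetD_neg_ofNat dp 1 0 (by omega) (by omega)]
      rw [List.getD, List.getElem?_eq_getElem (by omega)]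
      simp
    rw [hlast, hlenA, hvalA (n.toNat - 1) (by omega)]
    -- B side: the two reads carry pvM
    have hBlen : (PySem.List.slice score none (some 3)
        ++ PySem.List.pyRepeat [(0 : Int)] (n - 3)).length = n.toNat := by
      simp [PySem.List.slice_to score (by omega : (0:Int) ≤ 3),
        PySem.List.pyRepeat_singleton]
      omega
    have hBval : ∀ j : Nat, j < (n - 1).toNat →
        ((PySem.List.pyRange 3 (n - 1) 1).foldl (pvStepB score)
          (PySem.List.slice score none (some 3)
            ++ PySem.List.pyRepeat [(0 : Int)] (n - 3))).getD j 0 = pvM score j := by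
      rcases eq_or_ne n 3 with rfl | hn4
      · intro j hj
        rw [PySem.List.pyRange_one_eq_nil (by omega : (3:Int) - 1 ≤ 3), List.foldl_nil]
        -- n = 3: loop body never runs; read the initial list directly
        have hjlt : j < (score.take 3).length := by
          simp [List.length_take]; omega
        have hthis : (PySem.List.slice score none (some 3)
            ++ PySem.List.pyRepeat [(0 : Int)] ((3:Int) - 3)).getD j 0
            = (score.take 3).getD j 0 := by
          simp only [PySem.List.slice_to score (by omega : (0:Int) ≤ 3)]
          rw [show (3:Int).toNat = 3 from rfl]
          rw [List.getD, List.getD, List.getElem?_append_left hjlt]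
        rw [hthis]
        have hsc : (score.take 3).getD j 0 = score.getD j 0 := by
          rw [List.getD, List.getD, List.getElem?_take]
          rw [if_pos (by omega : j < 3)]
        rw [hsc]
        have hj2 : j < 2 := by omega
        interval_cases j <;> simp [pvM, pvSN_getD]
      · have hn4' : 4 ≤ n := by omega
        have hB := pvB_inv score n hn3 h2 (n - 4).toNat (by omega)
        rw [show (3 : Int) + (((n - 4).toNat : Nat) : Int) = n - 1 by omega] at hB
        obtain ⟨_, hvalB⟩ := hB
        intro j hj
        exact hvalB j (by omega)
    have hr3 : PySem.List.pyGetD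
        ((PySem.List.pyRange 3 (n - 1) 1).foldl (pvStepB score)
          (PySem.List.slice score none (some 3)
            ++ PySem.List.pyRepeat [(0 : Int)] (n - 3))) (n - 3) 0
        = pvM score (n.toNat - 3) := by
      rw [PySem.List.pyGetD_of_nonneg _ _ (by omega : (0:Int) ≤ n - 3),
          show (n - 3).toNat = n.toNat - 3 by omega]
      exact hBval (n.toNat - 3) (by omega)
    have hr2 : PySem.List.pyGetD
        ((PySem.List.pyRange 3 (n - 1) 1).foldl (pvStepB score)
          (PySem.List.slice score none (some 3)
            ++ PySem.List.pyRepeat [(0 : Int)] (n - 3))) (n - 2) 0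
        = pvM score (n.toNat - 2) := by
      rw [PySem.List.pyGetD_of_nonneg _ _ (by omega : (0:Int) ≤ n - 2),
          show (n - 2).toNat = n.toNat - 2 by omega]
      exact hBval (n.toNat - 2) (by omega)
    rw [hr3, hr2]
    -- the sum of score[:n] is the prefix sum pvPS (n.toNat - 1)
    have hsum : (PySem.List.slice score none (some n)).sum = pvPS score (n.toNat - 1) := by
      rw [PySem.List.slice_to score (by omega : (0:Int) ≤ n)]
      unfold pvPS
      rw [show n.toNat - 1 + 1 = n.toNat by omega]
    rw [hsum]
    -- duality closes the goal
    have hd := pvDual score (n.toNat - 3)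
    rw [show n.toNat - 3 + 2 = n.toNat - 1 by omega,
        show n.toNat - 3 + 1 = n.toNat - 2 by omega] at hd
    rw [hd, min_comm]
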